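-- pv_equiv track=rewrite | github.com/meylim/Astream-test | astream/services/cinemeta/client.py | extract_season_structure
-- ===== SOURCE A (Python) =====
-- from typing import Optional, Dict, List, Any
--
-- def extract_season_structure(videos: List[Dict]) -> Dict[int, List[Dict]]:
--     """
--     Organise les vidéos Cinemeta par saison.
--     Retourne : {saison_num: [episode_dict, ...]}
--     """
--     structure: Dict[int, List[Dict]] = {}
--     for video in videos:
--         season = video.get("season")
--         if season is None:
--             continue
--         if season not in structure:
--             structure[season] = []
--         structure[season].append(video)
--
--     # Trier les épisodes dans chaque saison
--     for season in structure:
--         structure[season].sort(key=lambda v: v.get("episode", 0))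
--
--     return structure
-- ===== SOURCE B (Python) =====
-- def extract_season_structure(videos):
--     """
--     Organise les vidéos Cinemeta par saison.
--     Retourne : {saison_num: [episode_dict, ...]}
--     """
--     # One stable sort of all season-bearing videos by episode, then one
--     # selection per season (seasons kept in first-appearance order).
--     ordered = sorted((v for v in videos if v.get("season") is not None),
--                      key=lambda v: v.get("episode", 0))
--     seasons = list(dict.fromkeys(v.get("season") for v in videos
--                                  if v.get("season") is not None))
--     return {s: [v for v in ordered if v.get("season") == s] for s in seasons}
-- ===== Notes on version B (the rewrite author's own statement) =====
-- stated objective: alternative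
-- what changed: Replaces A's incremental dict-grouping loop followed by a per-season sort with one global stable sort by episode of the season-bearing videos, an ordered dedup of the season numbers, and a per-season selection from the pre-sorted list (stable-sort ties keep A's order).
import Mathlib
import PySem

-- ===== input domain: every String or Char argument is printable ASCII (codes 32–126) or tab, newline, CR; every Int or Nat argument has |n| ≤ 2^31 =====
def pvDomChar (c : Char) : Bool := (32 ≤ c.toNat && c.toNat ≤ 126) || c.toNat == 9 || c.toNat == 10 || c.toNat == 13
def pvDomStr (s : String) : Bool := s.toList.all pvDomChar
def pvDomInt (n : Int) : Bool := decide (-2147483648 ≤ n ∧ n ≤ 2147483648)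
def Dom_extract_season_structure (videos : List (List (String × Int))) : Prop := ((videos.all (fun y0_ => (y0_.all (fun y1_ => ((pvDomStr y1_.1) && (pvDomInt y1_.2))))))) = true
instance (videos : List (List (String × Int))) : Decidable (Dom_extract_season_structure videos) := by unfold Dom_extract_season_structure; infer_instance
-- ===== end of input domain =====

-- ===== PORT A =====
-- B changes the decomposition: one global stable sort + ordered dedup + per-season
-- selection, instead of A's dict-grouping loop followed by a per-season sort.
-- v.get("season") on the video's association list
def pvGetSeason (v : List (String × Int)) : Option Int := (PySem.Dict.mk v).get? "season"
-- v.get("episode", 0)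
def pvEpisode (v : List (String × Int)) : Int := (PySem.Dict.mk v).getD "episode" 0

-- literal port of A: grouping loop (ensure key, append), then, since
-- `for season in structure: structure[season].sort(...)` replaces each key's value
-- in place, a per-item map sorting each season's list; returns the dict's items.
-- the grouping loop's body
def pvStepA (st : PySem.Dict Int (List (List (String × Int)))) (video : List (String × Int)) :
    PySem.Dict Int (List (List (String × Int))) :=
  match pvGetSeason video with
  | none => st
  | some season =>
    let st1 := if st.contains season then st else st.insert season []
    st1.modify season [] (fun vs => vs ++ [video])

def extract_season_structure (videos : List (List (String × Int))) : List (Int × List (List (String × Int))) :=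
  ((videos.foldl pvStepA PySem.Dict.empty).items.map
    (fun p => (p.1, PySem.List.sorted p.2 pvEpisode false)))

-- ===== PORT B =====
-- literal port of Source B: sorted(...) with the generator's filter; list(dict.fromkeys(
-- v.get("season") for v in videos if v.get("season") is not None)) is the ordered
-- dedup of videos.filterMap pvGetSeason; dict comprehension over distinct keys = map.
def extract_season_structure_alt (videos : List (List (String × Int))) : List (Int × List (List (String × Int))) :=
  (PySem.List.dedup (videos.filterMap pvGetSeason)).map (fun s =>
    (s, (PySem.List.sorted (videos.filter (fun v => (pvGetSeason v).isSome)) pvEpisode false).filter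
          (fun v => pvGetSeason v == some s)))

-- ===== PRECONDITION & SPEC =====
def Spec_extract_season_structure (videos : List (List (String × Int))) (out : List (Int × List (List (String × Int)))) : Prop := out = extract_season_structure_alt videos
instance (videos : List (List (String × Int))) (out : List (Int × List (List (String × Int)))) : Decidable (Spec_extract_season_structure videos out) := by unfold Spec_extract_season_structure; infer_instance

-- ===== CLAIM (what is proved, stated in full; the proofs are below) =====
def Claim_equal_extract_season_structure : Prop := ∀ (videos : List (List (String × Int))), Dom_extract_season_structure videos → Spec_extract_season_structure videos (extract_season_structure videos)

-- ===== LEMMAS AND PROOFS =====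
-- abbreviations for the proofs
def pvIsS (s : Int) (v : List (String × Int)) : Bool := pvGetSeason v == some s
def pvHasS (v : List (String × Int)) : Bool := (pvGetSeason v).isSome
def pvSeasons (videos : List (List (String × Int))) : List Int :=
  PySem.List.dedup (videos.filterMap pvGetSeason)

lemma pv_insertBy_front {α κ : Type} [LinearOrder κ] (key : α → κ) (x : α) (zs : List α)
    (h : ∀ z ∈ zs, key x < key z) :
    PySem.List.insertBy (fun a b => decide (key a < key b)) x zs = x :: zs := by
  cases zs with
  | nil => simp [PySem.List.insertBy]
  | cons z zs => simp [PySem.List.insertBy, h z (by simp)]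

lemma pv_filter_insertBy_neg {α κ : Type} [LinearOrder κ] (key : α → κ) (p : α → Bool)
    (x : α) (ys : List α) (hx : p x = false) :
    (PySem.List.insertBy (fun a b => decide (key a < key b)) x ys).filter p = ys.filter p := by
  induction ys with
  | nil => simp [PySem.List.insertBy, hx]
  | cons y ys ih =>
    simp only [PySem.List.insertBy]
    split
    · simp [hx]
    · simp only [List.filter_cons]
      split <;> simp [ih]

lemma pv_filter_insertBy_pos {α κ : Type} [LinearOrder κ] (key : α → κ) (p : α → Bool)
    (x : α) (ys : List α) (hx : p x = true)
    (hs : ys.Pairwise (fun a b => key a ≤ key b)) :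
    (PySem.List.insertBy (fun a b => decide (key a < key b)) x ys).filter p
      = PySem.List.insertBy (fun a b => decide (key a < key b)) x (ys.filter p) := by
  induction ys with
  | nil => simp [PySem.List.insertBy, hx]
  | cons y ys ih =>
    rcases List.pairwise_cons.mp hs with ⟨hy, hp⟩
    simp only [PySem.List.insertBy]
    split
    · rename_i hlt
      have hlt' : key x < key y := by simpa using hlt
      rw [List.filter_cons_of_pos hx]
      rw [pv_insertBy_front key x ((y :: ys).filter p)]
      intro z hz
      rcases List.mem_filter.mp hz with ⟨hzmem, _⟩
      rcases List.mem_cons.mp hzmem with rfl | hzys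
      · exact hlt'
      · exact lt_of_lt_of_le hlt' (hy z hzys)
    · rename_i hge
      by_cases hpy : p y = true
      · rw [List.filter_cons_of_pos hpy, List.filter_cons_of_pos hpy, ih hp]
        simp [PySem.List.insertBy, hge]
      · rw [List.filter_cons_of_neg (by simp [hpy]), List.filter_cons_of_neg (by simp [hpy]),
            ih hp]

lemma pv_filter_sorted {α κ : Type} [LinearOrder κ] (key : α → κ) (p : α → Bool)
    (xs : List α) :
    (PySem.List.sorted xs key false).filter p = PySem.List.sorted (xs.filter p) key false := by
  induction xs using List.reverseRecOn with
  | nil => simp [PySem.List.sorted]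
  | append_singleton xs x ih =>
    rw [PySem.List.sorted_eq_foldl_insertBy, List.foldl_append,
        ← PySem.List.sorted_eq_foldl_insertBy]
    simp only [List.foldl_cons, List.foldl_nil, List.filter_append]
    by_cases hx : p x = true
    · rw [pv_filter_insertBy_pos key p x _ hx (PySem.List.sorted_pairwise xs key), ih,
          show List.filter p [x] = [x] by simp [hx],
          PySem.List.sorted_eq_foldl_insertBy (xs.filter p ++ [x]), List.foldl_append,
          ← PySem.List.sorted_eq_foldl_insertBy]
      simp
    · rw [pv_filter_insertBy_neg key p x _ (by simpa using hx), ih]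
      simp [hx]

lemma pv_not_mem_seasons_filter_nil (s : Int) (videos : List (List (String × Int)))
    (h : s ∉ pvSeasons videos) : videos.filter (pvIsS s) = [] := by
  rw [List.filter_eq_nil_iff]
  intro v hv hps
  apply h
  unfold pvSeasons
  rw [PySem.List.mem_dedup]
  exact List.mem_filterMap.mpr ⟨v, hv, by simpa [pvIsS] using hps⟩

lemma pv_groupA_items (videos : List (List (String × Int))) :
    (videos.foldl pvStepA PySem.Dict.empty).items
      = (pvSeasons videos).map (fun s => (s, videos.filter (pvIsS s))) := by
  induction videos using List.reverseRecOn with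
  | nil => simp [pvSeasons, PySem.List.dedup, PySem.Set.ofList, PySem.Dict.empty]
  | append_singleton videos v ih =>
    rw [List.foldl_append, List.foldl_cons, List.foldl_nil]
    have hkeys : (videos.foldl pvStepA PySem.Dict.empty).keys = pvSeasons videos := by
      simp only [PySem.Dict.keys, ih, List.map_map]
      exact List.map_id'' (fun _ => rfl) _
    cases hv : pvGetSeason v with
    | none =>
      have hstep : pvStepA (videos.foldl pvStepA PySem.Dict.empty) v
          = videos.foldl pvStepA PySem.Dict.empty := by
        simp [pvStepA, hv]
      have hseq : pvSeasons (videos ++ [v]) = pvSeasons videos := by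
        simp [pvSeasons, List.filterMap_append, hv]
      rw [hstep, ih, hseq]
      apply List.map_congr_left
      intro s _
      rw [List.filter_append, show List.filter (pvIsS s) [v] = [] by simp [pvIsS, hv],
          List.append_nil]
    | some s0 =>
      have hfm : pvSeasons (videos ++ [v]) = PySem.Set.add (pvSeasons videos) s0 := by
        unfold pvSeasons
        rw [List.filterMap_append, PySem.List.dedup_eq_ofList, PySem.Set.ofList_eq_foldl,
            List.foldl_append, ← PySem.Set.ofList_eq_foldl, ← PySem.List.dedup_eq_ofList]
        simp [hv]
      have hcont : (videos.foldl pvStepA PySem.Dict.empty).contains s0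
          = decide (s0 ∈ pvSeasons videos) := by
        rw [PySem.Dict.contains_eq_decide_mem_keys, hkeys]
      have hnodupS : (pvSeasons videos).Nodup := PySem.List.nodup_dedup _
      by_cases hmem : s0 ∈ pvSeasons videos
      · have hget : (videos.foldl pvStepA PySem.Dict.empty).getD s0 []
            = videos.filter (pvIsS s0) :=
          PySem.Dict.getD_of_mem_items _
            (by rw [ih]
                exact List.mem_map_of_mem hmem)
            (by rw [hkeys]; exact hnodupS) []
        have hstep : pvStepA (videos.foldl pvStepA PySem.Dict.empty) v
            = (videos.foldl pvStepA PySem.Dict.empty).insert s0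
                (videos.filter (pvIsS s0) ++ [v]) := by
          simp [pvStepA, hv, PySem.Dict.modify, hcont, hmem, hget]
        rw [hstep,
            PySem.Dict.items_insert_of_contains _ _ (by rw [hcont]; simp [hmem]),
            ih, hfm, show PySem.Set.add (pvSeasons videos) s0 = pvSeasons videos by
              simp [PySem.Set.add, hmem],
            List.map_map]
        apply List.map_congr_left
        intro s _
        simp only [Function.comp]
        by_cases h0 : s = s0
        · subst h0
          simp [List.filter_append, pvIsS, hv]
        · simp [List.filter_append, pvIsS, hv, h0, Ne.symm h0]
      · have hstep : pvStepA (videos.foldl pvStepA PySem.Dict.empty) v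
            = (videos.foldl pvStepA PySem.Dict.empty).insert s0 [v] := by
          simp [pvStepA, hv, PySem.Dict.modify, hcont, hmem,
                PySem.Dict.getD_insert_self, PySem.Dict.insert_insert_self]
        rw [hstep,
            PySem.Dict.items_insert_of_not_contains _ _ (by rw [hcont]; simp [hmem]),
            ih, hfm, show PySem.Set.add (pvSeasons videos) s0 = pvSeasons videos ++ [s0] by
              simp [PySem.Set.add, hmem],
            List.map_append]
        congr 1
        · apply List.map_congr_left
          intro s hs
          have h0 : s ≠ s0 := fun h => hmem (h ▸ hs)
          rw [List.filter_append, show List.filter (pvIsS s) [v] = [] by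
                simp [pvIsS, hv, Ne.symm h0],
              List.append_nil]
        · simp [List.filter_append, pvIsS, hv,
                pv_not_mem_seasons_filter_nil s0 videos hmem]

-- ===== VERDICT (by name: the statement is the Claim_ definition above) =====
theorem extract_season_structure_spec : Claim_equal_extract_season_structure := by
  intro videos _
  unfold Spec_extract_season_structure extract_season_structure extract_season_structure_alt
  rw [pv_groupA_items, List.map_map]
  apply List.map_congr_left
  intro s hs
  simp only [Function.comp]
  congr 1
  rw [show (fun v => pvGetSeason v == some s) = pvIsS s from rfl,
      show (fun v => (pvGetSeason v).isSome) = pvHasS from rfl]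
  rw [pv_filter_sorted pvEpisode (pvIsS s) (videos.filter pvHasS), List.filter_filter]
  congr 1
  apply List.filter_congr
  intro v _
  by_cases h : pvIsS s v = true
  · have : pvHasS v = true := by
      unfold pvIsS at h; unfold pvHasS
      cases hg : pvGetSeason v <;> simp [hg] at h ⊢
    simp [h, this]
  · simp [h]
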